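-- pv_equiv track=rewrite | github.com/pritish-ranjan/python_misc | python_projects/python_standalone/ion_influx_relabeling_final.py | solution
-- ===== SOURCE A (Python) =====
-- def search_parent_q(q, current_node, reduce):
--     reduce = int(reduce/2)
--     right_node=current_node-1
--     left_node=right_node-reduce
--
--     if(right_node == q or left_node == q):
--         return current_node
--     else:
--         if(q <= left_node):
--             return search_parent_q(q, left_node, reduce)
--         else:
--             return search_parent_q(q, right_node, reduce)
--
-- def solution(h, q):
--     length_q = len(q)
--
--     if(h > 30 or h < 1):
--         raise ValueError('Given heigth is invalid!')
--     if(length_q > 10000 or length_q < 1):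
--         raise ValueError('Given list is invalid!')
--
--     nodes = (2**h)-1
--     output = []
--
--     for i in range(length_q):
--         if (q[i]<nodes and q[i]>0):
--             output.append(search_parent_q(q[i], nodes, nodes-1))
--         else:
--             output.append(-1)
--     return output
-- ===== SOURCE B (Python) =====
-- def solution(h, q):
--     if h > 30 or h < 1:
--         raise ValueError('Given heigth is invalid!')
--     if len(q) > 10000 or len(q) < 1:
--         raise ValueError('Given list is invalid!')
--
--     nodes = (1 << h) - 1
--
--     def parent(x):
--         if not (0 < x < nodes):
--             return -1
--         cur, size = nodes, nodes
--         while True: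
--             size //= 2            # size of each child subtree
--             right = cur - 1
--             left = right - size
--             if x == right or x == left:
--                 return cur
--             cur = left if x <= left else right
--
--     return [parent(x) for x in q]
-- ===== Notes on version B (the rewrite author's own statement) =====
-- stated objective: simpler
-- what changed: The recursive helper is inlined as an iterative while-loop descent keeping (cur, size) state seeded with the subtree size instead of A's (current_node, reduce) recursion seeded with nodes-1, and the index-based for loop with append is replaced by a direct comprehension over q.
import Mathlib
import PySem

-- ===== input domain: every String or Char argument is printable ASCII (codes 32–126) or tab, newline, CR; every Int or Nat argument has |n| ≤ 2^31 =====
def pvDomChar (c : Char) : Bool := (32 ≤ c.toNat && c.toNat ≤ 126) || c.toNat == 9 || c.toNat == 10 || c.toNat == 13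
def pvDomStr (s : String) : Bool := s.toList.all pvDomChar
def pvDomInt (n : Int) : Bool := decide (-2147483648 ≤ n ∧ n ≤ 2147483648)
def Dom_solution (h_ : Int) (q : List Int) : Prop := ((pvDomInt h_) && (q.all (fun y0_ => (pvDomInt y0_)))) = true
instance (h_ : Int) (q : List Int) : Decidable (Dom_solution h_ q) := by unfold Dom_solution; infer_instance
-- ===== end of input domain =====

-- B inlines A's recursive helper as an iterative descent on (cur, size) state and maps over q
-- directly instead of indexing with range(len(q)); objective: simpler.


-- ===== PORT A =====
-- search_parent_q, recursion made total with a fuel counter (the caller passes h levels,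
-- enough for the descent down the height-h tree; fuel exhaustion is never reached inside Pre_).
def searchParentQ (fuel : Nat) (q current_node reduce : Int) : Int :=
  match fuel with
  | 0 => current_node
  | Nat.succ fuel =>
    let reduce := PySem.Int.truncdiv reduce 2   -- int(reduce/2): exact, |reduce| < 2^31 < 2^53
    let right_node := current_node - 1
    let left_node := right_node - reduce
    if right_node = q ∨ left_node = q then current_node
    else
      if q ≤ left_node then searchParentQ fuel q left_node reduce
      else searchParentQ fuel q right_node reduce

-- the two 'raise ValueError' branches are exactly the inputs excluded by Pre_solution
def solution (h_ : Int) (q : List Int) : List Int :=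
  let nodes : Int := 2 ^ h_.toNat - 1    -- 2**h; h ≥ 1 under Pre_
  (PySem.List.pyRange 0 q.length 1).foldl
    (fun output i =>
      let qi := PySem.List.pyGetD q i 0   -- q[i]; i ∈ range(len(q)) is always in range
      output ++ [if qi < nodes ∧ 0 < qi then searchParentQ h_.toNat qi nodes (nodes - 1) else -1])
    []

-- ===== PORT B =====
-- the while-True loop of Source B, as a tail-recursive function on the (cur, size) state;
-- same fuel-counter totality guard, never reached inside Pre_.
def parentLoop (fuel : Nat) (x cur size : Int) : Int :=
  match fuel with
  | 0 => cur
  | Nat.succ fuel =>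
    let size := PySem.Int.floordiv size 2
    let right := cur - 1
    let left := right - size
    if x = right ∨ x = left then cur
    else parentLoop fuel x (if x ≤ left then left else right) size

def solution_alt (h_ : Int) (q : List Int) : List Int :=
  let nodes : Int := 2 ^ h_.toNat - 1
  q.map (fun x => if 0 < x ∧ x < nodes then parentLoop h_.toNat x nodes nodes else -1)

-- ===== PRECONDITION & SPEC =====
-- Pre_ excludes exactly the inputs on which A raises ValueError (h outside 1..30, len(q) outside 1..10000)
def Pre_solution (h_ : Int) (q : List Int) : Prop :=
  1 ≤ h_ ∧ h_ ≤ 30 ∧ 1 ≤ q.length ∧ q.length ≤ 10000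
instance (h_ : Int) (q : List Int) : Decidable (Pre_solution h_ q) := by unfold Pre_solution; infer_instance

def pvWitness_solution : Int × List Int := (3, [1, 2, 3, 4, 5, 6, 7, 0, 8])

def Spec_solution (h_ : Int) (q : List Int) (out : List Int) : Prop := out = solution_alt h_ q
instance (h_ : Int) (q : List Int) (out : List Int) : Decidable (Spec_solution h_ q out) := by unfold Spec_solution; infer_instance

-- ===== CLAIM (what is proved, stated in full; the proofs are below) =====
def Claim_equal_solution : Prop := ∀ (h_ : Int) (q : List Int), Dom_solution h_ q → Pre_solution h_ q → Spec_solution h_ q (solution h_ q)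

-- ===== LEMMAS AND PROOFS =====

-- int(r/2) (truncating) and r//2 (flooring) agree for nonnegative r
lemma truncdiv_eq_floordiv {r : Int} (hr : 0 ≤ r) :
    PySem.Int.truncdiv r 2 = PySem.Int.floordiv r 2 := by
  unfold PySem.Int.truncdiv
  rw [PySem.Int.floordiv_eq_ediv_of_pos (by norm_num), Int.tdiv_eq_ediv_of_nonneg hr]

lemma floordiv_two_nonneg {r : Int} (hr : 0 ≤ r) : 0 ≤ PySem.Int.floordiv r 2 := by
  rw [PySem.Int.floordiv_eq_ediv_of_pos (by norm_num)]; positivity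

-- with equal nonnegative reduce/size arguments the recursion and the loop coincide step for step
lemma search_eq_loop (fuel : Nat) (x : Int) :
    ∀ (cur r : Int), 0 ≤ r → searchParentQ fuel x cur r = parentLoop fuel x cur r := by
  induction fuel with
  | zero => intro cur r _; rfl
  | succ fuel ih =>
    intro cur r hr
    simp only [searchParentQ, parentLoop, truncdiv_eq_floordiv hr, eq_comm]
    split_ifs with h1 h2 <;>
      first | rfl | exact ih _ _ (floordiv_two_nonneg hr)

-- first call: A starts from reduce = n-1, B from size = n; for odd positive n the halvings agree
lemma search_first (fuel : Nat) (x cur n : Int) (hn : 1 ≤ n) (hodd : n % 2 = 1) :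
    searchParentQ fuel x cur (n - 1) = parentLoop fuel x cur n := by
  cases fuel with
  | zero => rfl
  | succ fuel =>
    have hdiv : PySem.Int.truncdiv (n - 1) 2 = PySem.Int.floordiv n 2 := by
      unfold PySem.Int.truncdiv
      rw [PySem.Int.floordiv_eq_ediv_of_pos (by norm_num),
        Int.tdiv_eq_ediv_of_nonneg (by omega)]
      omega
    simp only [searchParentQ, parentLoop, hdiv, eq_comm]
    split_ifs with h1 h2 <;>
      first | rfl | exact search_eq_loop fuel x _ _ (floordiv_two_nonneg (by omega))

-- ===== VERDICT (by name: the statement is the Claim_ definition above) =====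
theorem solution_spec : Claim_equal_solution := by
  intro h_ q _hdom hpre
  obtain ⟨hp1, hp2, hp3, hp4⟩ := hpre
  unfold Spec_solution
  simp only [solution, solution_alt]
  rw [PySem.List.foldl_pyRange_zero_pyGetD' q 0
      (fun output qi =>
        output ++ [if qi < 2 ^ h_.toNat - 1 ∧ 0 < qi then
          searchParentQ h_.toNat qi (2 ^ h_.toNat - 1) (2 ^ h_.toNat - 1 - 1) else -1]) [],
    PySem.List.foldl_append_singleton_eq_map]
  simp only [List.nil_append]
  apply List.map_congr_left
  intro x _
  have hh : 1 ≤ h_.toNat := by omega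
  have hn : (1:Int) ≤ 2 ^ h_.toNat - 1 := by
    have : (2:Int) ^ 1 ≤ 2 ^ h_.toNat := pow_le_pow_right₀ (by norm_num) hh
    omega
  have hodd : ((2:Int) ^ h_.toNat - 1) % 2 = 1 := by
    have : (2:Int) ∣ 2 ^ h_.toNat := dvd_pow_self 2 (by omega)
    omega
  by_cases hx : 0 < x ∧ x < 2 ^ h_.toNat - 1
  · rw [if_pos ⟨hx.2, hx.1⟩, if_pos hx, search_first h_.toNat x _ _ hn hodd]
  · rw [if_neg (by tauto), if_neg hx]
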